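-- pv_equiv track=rewrite | github.com/whdgusdl48/Programmers_Algorithm | Level2/solution_2021_03_31.py | solution
-- ===== SOURCE A (Python) =====
-- import heapq
--
-- def solution(scoville, K):
--     heapq.heapify(scoville)
--     count = 0
--     while scoville[0] < K:
--         if len(scoville) < 2:
--             return -1
--         else:
--             a = heapq.heappop(scoville)
--             b = heapq.heappop(scoville)
--             c = a + (b * 2)
--             heapq.heappush(scoville,c)
--             count += 1
--     return count
-- ===== SOURCE B (Python) =====
-- def solution(scoville, K):
--     # Maintain an explicitly sorted list instead of a heap; does not mutate
--     # the argument (A heapifies it in place) -- return value is identical.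
--     s = sorted(scoville)
--     count = 0
--     while s[0] < K:
--         if len(s) < 2:
--             return -1
--         c = s[0] + s[1] * 2
--         rest = s[2:]
--         i = 0
--         while i < len(rest) and rest[i] < c:
--             i += 1
--         s = rest[:i] + [c] + rest[i:]
--         count += 1
--     return count
-- ===== Notes on version B (the rewrite author's own statement) =====
-- stated objective: alternative
-- what changed: Replaces the binary heap with a single upfront sort plus taking the two front elements and linearly re-inserting the mix into the sorted tail (B also does not mutate its argument, while A heapifies it in place).
import Mathlib
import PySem

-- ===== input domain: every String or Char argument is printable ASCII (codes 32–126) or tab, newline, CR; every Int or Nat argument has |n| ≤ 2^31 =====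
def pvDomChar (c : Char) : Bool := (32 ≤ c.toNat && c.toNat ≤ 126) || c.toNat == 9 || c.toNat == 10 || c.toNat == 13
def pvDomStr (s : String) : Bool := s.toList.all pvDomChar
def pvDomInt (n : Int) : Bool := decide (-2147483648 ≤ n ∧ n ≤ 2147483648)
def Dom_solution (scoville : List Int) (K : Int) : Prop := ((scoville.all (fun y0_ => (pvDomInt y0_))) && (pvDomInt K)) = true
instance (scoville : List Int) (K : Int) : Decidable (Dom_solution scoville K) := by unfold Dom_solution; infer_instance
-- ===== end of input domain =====

-- B replaces A's binary heap by one upfront sort plus sorted linear re-insertion;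
-- same return value everywhere; A mutates its argument in place (heapify), B does
-- not — the equivalence proved here is about the return value only.

-- ===== PORT A =====
-- heapq is a standard-library module; its calls are ported by their documented
-- semantics over the heap's contents: heap[0] is the smallest element, heappop
-- removes and returns it, heappush adds its argument (exact for Int elements:
-- which of several equal minima is removed cannot affect any computed value).

-- used by decreasing_by: erasing a member shrinks the list
theorem pv_erase_len (s : List Int) (m : Int) (h : m ∈ s) :
    (s.erase m).length = s.length - 1 := List.length_erase_of_mem h

def solutionGo (s : List Int) (K : Int) (count : Int) : Int :=
  match hm : PySem.List.min? s (fun x => x) with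
  | none => 0   -- scoville[0] on an empty heap raises IndexError: excluded by Pre_solution
  | some a =>
    if a < K then
      if _hl : s.length < 2 then -1
      else
        let s1 := s.erase a
        match hb : PySem.List.min? s1 (fun x => x) with
        | none => 0   -- unreachable: s1 is nonempty when s.length ≥ 2
        | some b =>
          solutionGo ((s1.erase b) ++ [a + b * 2]) K (count + 1)
    else count
termination_by s.length
decreasing_by
  have ha : a ∈ s := PySem.List.min?_mem hm
  have hbm : b ∈ s.erase a := PySem.List.min?_mem hb
  have h1 : (s.erase a).length = s.length - 1 := pv_erase_len s a ha
  have h2 : ((s.erase a).erase b).length = (s.erase a).length - 1 := pv_erase_len _ b hbm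
  simp only [List.length_append, List.length_cons, List.length_nil]
  omega

def solution (scoville : List Int) (K : Int) : Int :=
  solutionGo scoville K 0

-- ===== PORT B =====
-- used by decreasing_by of solutionAltGo
def pvInsert (c : Int) (l : List Int) : List Int :=
  match l with
  | [] => [c]
  | x :: xs => if x < c then x :: pvInsert c xs else c :: x :: xs

theorem pvInsert_length (c : Int) (l : List Int) :
    (pvInsert c l).length = l.length + 1 := by
  induction l with
  | nil => rfl
  | cons x xs ih => simp only [pvInsert]; split <;> simp [ih]

-- the inner `while i < len(rest) and rest[i] < c` scan + splice of Source B is pvInsert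
def solutionAltGo (s : List Int) (K : Int) (count : Int) : Int :=
  match s with
  | [] => 0   -- s[0] raises IndexError: excluded by Pre_solution
  | a :: xs =>
    if a < K then
      match xs with
      | [] => -1   -- len(s) < 2
      | b :: rest => solutionAltGo (pvInsert (a + b * 2) rest) K (count + 1)
    else count
termination_by s.length
decreasing_by
  simp [pvInsert_length]

def solution_alt (scoville : List Int) (K : Int) : Int :=
  solutionAltGo (PySem.List.sorted scoville (fun x => x) false) K 0

-- ===== PRECONDITION & SPEC =====
-- A evaluates scoville[0] first, so it raises IndexError on the empty list
-- (B raises there too); Pre_ excludes exactly the empty input.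
def Pre_solution (scoville : List Int) (K : Int) : Prop := scoville ≠ []
instance (scoville : List Int) (K : Int) : Decidable (Pre_solution scoville K) := by unfold Pre_solution; infer_instance
def pvWitness_solution : List Int × Int := ([1, 2, 3, 9, 10, 12], 7)

def Spec_solution (scoville : List Int) (K : Int) (out : Int) : Prop := out = solution_alt scoville K
instance (scoville : List Int) (K : Int) (out : Int) : Decidable (Spec_solution scoville K out) := by unfold Spec_solution; infer_instance

-- ===== CLAIM (what is proved, stated in full; the proofs are below) =====
def Claim_equal_solution : Prop := ∀ (scoville : List Int) (K : Int), Dom_solution scoville K → Pre_solution scoville K → Spec_solution scoville K (solution scoville K)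

-- ===== LEMMAS AND PROOFS =====

-- the minimum of any permutation of a sorted nonempty list is its head
theorem min?_of_perm_sorted (s : List Int) (a : Int) (ts : List Int)
    (hp : s.Perm (a :: ts)) (hs : (a :: ts).Pairwise (· ≤ ·)) :
    PySem.List.min? s (fun x => x) = some a := by
  match hm : PySem.List.min? s (fun x => x) with
  | none =>
    have : s = [] := (PySem.List.min?_eq_none_iff s (fun x => x)).mp hm
    subst this
    exact absurd hp.symm (by simp)
  | some m =>
    have hmem : m ∈ s := PySem.List.min?_mem hm
    have hmin := PySem.List.min?_isMin hm
    have ha : a ∈ s := hp.symm.subset (List.mem_cons_self)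
    have hma : m ≤ a := hmin a ha
    have hm2 : m ∈ a :: ts := hp.subset hmem
    rcases List.mem_cons.mp hm2 with h1 | h2
    · exact congrArg some h1
    · have : a ≤ m := (List.pairwise_cons.mp hs).1 m h2
      have : m = a := le_antisymm hma this
      exact congrArg some this

theorem pvInsert_perm (c : Int) (l : List Int) : (pvInsert c l).Perm (c :: l) := by
  induction l with
  | nil => rfl
  | cons x xs ih =>
    simp only [pvInsert]
    split
    · exact (ih.cons x).trans (List.Perm.swap c x xs)
    · rfl

theorem pvInsert_pairwise (c : Int) (l : List Int) (h : l.Pairwise (· ≤ ·)) :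
    (pvInsert c l).Pairwise (· ≤ ·) := by
  induction l with
  | nil => simp [pvInsert]
  | cons x xs ih =>
    rcases List.pairwise_cons.mp h with ⟨hx, hxs⟩
    simp only [pvInsert]
    split
    · rename_i hlt
      refine List.pairwise_cons.mpr ⟨?_, ih hxs⟩
      intro y hy
      rcases List.mem_cons.mp ((pvInsert_perm c xs).mem_iff.mp hy) with h1 | h2
      · subst h1; omega
      · exact hx y h2
    · rename_i hge
      refine List.pairwise_cons.mpr ⟨?_, h⟩
      intro y hy
      rcases List.mem_cons.mp hy with h1 | h2
      · subst h1; omega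
      · exact le_trans (by omega) (hx y h2)

theorem altGo_cons (a : Int) (xs : List Int) (K count : Int) :
    solutionAltGo (a :: xs) K count =
      if a < K then
        (match xs with
         | [] => (-1 : Int)
         | b :: rest => solutionAltGo (pvInsert (a + b * 2) rest) K (count + 1))
      else count := by
  rw [solutionAltGo.eq_def]

theorem go_nil_eq (K count : Int) : solutionGo [] K count = solutionAltGo [] K count := by
  have hnil : PySem.List.min? ([] : List Int) (fun x => x) = none :=
    (PySem.List.min?_eq_none_iff [] (fun x => x)).mpr rfl
  rw [solutionGo.eq_def, solutionAltGo.eq_def]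
  split
  · rfl
  · rename_i m h; rw [hnil] at h; cases h

theorem go_eq : ∀ (n : ℕ) (s t : List Int) (K count : Int),
    s.length ≤ n → s.Perm t → t.Pairwise (· ≤ ·) →
    solutionGo s K count = solutionAltGo t K count := by
  intro n
  induction n with
  | zero =>
    intro s t K count hlen hp hs
    have hs0 : s = [] := List.length_eq_zero_iff.mp (Nat.le_zero.mp hlen)
    subst hs0
    have ht : t = [] := hp.symm.eq_nil
    subst ht
    exact go_nil_eq K count
  | succ n ih =>
    intro s t K count hlen hp hs
    match t with
    | [] =>
      have hs0 : s = [] := hp.eq_nil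
      subst hs0
      exact go_nil_eq K count
    | a :: ts =>
      have hmin : PySem.List.min? s (fun x => x) = some a :=
        min?_of_perm_sorted s a ts hp hs
      rw [solutionGo.eq_def]
      split
      · rename_i h; rw [hmin] at h; cases h
      · rename_i m h
        rw [hmin] at h; cases h
        rw [altGo_cons]
        by_cases hK : a < K
        · simp only [if_pos hK]
          have hlen_eq : s.length = ts.length + 1 := by
            rw [hp.length_eq]; simp
          match ts with
          | [] =>
            have h2 : s.length < 2 := by
              simp only [List.length_nil] at hlen_eq; omega
            simp [h2]
          | b :: rest =>
            have h2 : ¬ s.length < 2 := by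
              simp only [List.length_cons] at hlen_eq; omega
            simp only [dif_neg h2]
            have hp1 : (s.erase a).Perm (b :: rest) := by
              have h := hp.erase a
              simpa using h
            have hs1 : (b :: rest).Pairwise (· ≤ ·) := List.Pairwise.of_cons hs
            have hbmin : PySem.List.min? (s.erase a) (fun x => x) = some b :=
              min?_of_perm_sorted _ b rest hp1 hs1
            split
            · rename_i h'; rw [hbmin] at h'; cases h'
            · rename_i m' h'
              rw [hbmin] at h'; cases h'
              apply ih
              · have e1 : (s.erase a).length = s.length - 1 :=
                  pv_erase_len s a (hp.symm.subset List.mem_cons_self)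
                have e2 : ((s.erase a).erase b).length = (s.erase a).length - 1 :=
                  pv_erase_len _ b (hp1.symm.subset List.mem_cons_self)
                simp only [List.length_append, List.length_cons, List.length_nil, e2, e1]
                simp only [List.length_cons] at hlen_eq
                omega
              · have hp2 : ((s.erase a).erase b).Perm rest := by
                  have h := hp1.erase b
                  simpa using h
                exact ((List.perm_append_singleton _ _).trans (hp2.cons _)).trans
                  (pvInsert_perm _ _).symm
              · exact pvInsert_pairwise _ rest (List.Pairwise.of_cons hs1)
        · simp [hK]

-- ===== VERDICT (by name: the statement is the Claim_ definition above) =====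
theorem solution_spec : Claim_equal_solution := by
  intro scoville K _ _
  unfold Spec_solution solution solution_alt
  exact go_eq scoville.length scoville (PySem.List.sorted scoville (fun x => x) false)
    K 0 le_rfl (PySem.List.sorted_perm scoville (fun x => x) false).symm
    (PySem.List.sorted_pairwise scoville (fun x => x))
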